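-- pv_equiv track=rewrite | github.com/minjunkiiim/algorithm_problem_solving | codeforces/CodeTON4/B.py | f
-- ===== SOURCE A (Python) =====
-- def f(n):
--     if n == 1:
--         return []
--
--     if n % 2 == 0:
--         return None
--
--     ret = f((n - 1) // 2)
--     if ret is not None:
--         ret.append(2)
--         return ret
--
--     ret = f((n + 1) // 2)
--     if ret is not None:
--         ret.append(1)
--         return ret
--
--     return None
-- ===== SOURCE B (Python) =====
-- def f(n):
--     if n % 2 == 0:
--         return None
--     t = (n - 1) // 2
--     moves = []
--     while t > 0:
--         moves.append(2 if t % 2 else 1)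
--         t //= 2
--     return moves[::-1]
-- ===== Notes on version B (the rewrite author's own statement) =====
-- stated objective: alternative
-- what changed: Replaces the try-both-children recursion by a closed-form characterization: the move list is exactly the binary digits of (n-1)//2 read high-to-low (1 bit -> move 2, 0 bit -> move 1), extracted by a simple div/mod loop and reversed once.
import Mathlib
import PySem

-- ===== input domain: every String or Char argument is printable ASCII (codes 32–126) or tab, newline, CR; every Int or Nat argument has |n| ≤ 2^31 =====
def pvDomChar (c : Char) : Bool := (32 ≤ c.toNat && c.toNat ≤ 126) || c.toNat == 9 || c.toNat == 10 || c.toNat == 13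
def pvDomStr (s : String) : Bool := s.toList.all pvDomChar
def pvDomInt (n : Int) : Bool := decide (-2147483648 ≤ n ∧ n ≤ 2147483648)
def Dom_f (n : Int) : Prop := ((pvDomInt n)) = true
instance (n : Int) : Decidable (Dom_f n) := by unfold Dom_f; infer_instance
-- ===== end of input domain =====

-- B replaces A's try-both-children recursion by the closed form "binary digits of (n-1)//2,
-- high-to-low, bit 1 -> move 2, bit 0 -> move 1", a single div/mod loop; objective: alternative.

-- ===== PORT A =====
-- fuel makes the Python recursion total in Lean; on Pre_f the fuel n.toNat+1 is never exhausted
def fAux (fuel : Nat) (n : Int) : Option (List Int) :=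
  match fuel with
  | 0 => none
  | fuel + 1 =>
    if n = 1 then some []
    else if PySem.Int.mod n 2 = 0 then none
    else
      match fAux fuel (PySem.Int.floordiv (n - 1) 2) with
      | some ret => some (ret ++ [2])
      | none =>
        match fAux fuel (PySem.Int.floordiv (n + 1) 2) with
        | some ret => some (ret ++ [1])
        | none => none

def f (n : Int) : Option (List Int) := fAux (n.toNat + 1) n

-- ===== PORT B =====
-- fuel makes the while loop total in Lean; t at least halves each step, so fuel t0.toNat+1 ≤ n.toNat+1 is never exhausted
def fAltLoop (fuel : Nat) (t : Int) (moves : List Int) : List Int :=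
  match fuel with
  | 0 => moves.reverse
  | fuel + 1 =>
    if 0 < t then
      fAltLoop fuel (PySem.Int.floordiv t 2)
        (moves ++ [if PySem.Int.mod t 2 ≠ 0 then (2 : Int) else 1])
    else moves.reverse          -- moves[::-1]

def f_alt (n : Int) : Option (List Int) :=
  if PySem.Int.mod n 2 = 0 then none
  else some (fAltLoop (n.toNat + 1) (PySem.Int.floordiv (n - 1) 2) [])

-- ===== PRECONDITION & SPEC =====
-- Pre_ excludes negative odd inputs, on which A recurses without reaching the base case and raises RecursionError.
def Pre_f (n : Int) : Prop := n % 2 = 0 ∨ 1 ≤ n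
instance (n : Int) : Decidable (Pre_f n) := by unfold Pre_f; infer_instance
def pvWitness_f : Int := (27)

def Spec_f (n : Int) (out : Option (List Int)) : Prop := out = f_alt n
instance (n : Int) (out : Option (List Int)) : Decidable (Spec_f n out) := by unfold Spec_f; infer_instance

-- ===== CLAIM (what is proved, stated in full; the proofs are below) =====
def Claim_equal_f : Prop := ∀ (n : Int), Dom_f n → Pre_f n → Spec_f n (f n)

-- ===== LEMMAS AND PROOFS =====

theorem mod2_eq (n : Int) : PySem.Int.mod n 2 = n % 2 :=
  PySem.Int.mod_eq_emod_of_pos (by omega)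

theorem fdiv2_eq (a : Int) : PySem.Int.floordiv a 2 = a / 2 :=
  PySem.Int.floordiv_eq_ediv_of_pos (by omega)

theorem fAux_even (fuel : Nat) (n : Int) (h : n % 2 = 0) : fAux fuel n = none := by
  cases fuel with
  | zero => rfl
  | succ fuel =>
    have h1 : n ≠ 1 := by omega
    simp [fAux, h1, mod2_eq, h]

-- the joint invariant: A's result on odd n ≥ 1 is some l, and B's loop started at
-- t = (n-1)/2 with accumulator acc ends in l ++ acc.reverse
theorem main_aux : ∀ (k : Nat) (n : Int), n.toNat = k → 1 ≤ n → n % 2 = 1 →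
    ∀ (fuel1 fuel2 : Nat), n.toNat < fuel1 → ((n - 1) / 2).toNat < fuel2 → ∀ (acc : List Int),
      ∃ l, fAux fuel1 n = some l ∧ fAltLoop fuel2 ((n - 1) / 2) acc = l ++ acc.reverse := by
  intro k
  induction k using Nat.strong_induction_on with
  | _ k ih =>
    intro n hk h1 h2 fuel1 fuel2 hf1 hf2 acc
    obtain ⟨f1, rfl⟩ : ∃ k, fuel1 = k + 1 := ⟨fuel1 - 1, by omega⟩
    obtain ⟨f2, rfl⟩ : ∃ k, fuel2 = k + 1 := ⟨fuel2 - 1, by omega⟩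
    by_cases hone : n = 1
    · subst hone
      refine ⟨[], by simp [fAux], ?_⟩
      norm_num [fAltLoop]
    · have hn3 : 3 ≤ n := by omega
      by_cases h4 : n % 4 = 3
      · -- t = (n-1)/2 is odd: B appends move 2 and recurses on t/2 = (t-1)/2;
        -- A's first child m = (n-1)/2 = t succeeds and gets move 2 appended
        set m : Int := (n - 1) / 2 with hm
        have hmodd : m % 2 = 1 := by omega
        have hm1 : 1 ≤ m := by omega
        obtain ⟨l, ha, hb⟩ := ih m.toNat (by omega) m rfl hm1 hmodd f1 f2
          (by omega) (by omega) (acc ++ [2])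
        refine ⟨l ++ [2], ?_, ?_⟩
        · simp [fAux, hone, mod2_eq, h2, fdiv2_eq, ← hm, ha]
        · have hdiv : m / 2 = (m - 1) / 2 := by omega
          have hmod : PySem.Int.mod m 2 ≠ 0 := by rw [mod2_eq]; omega
          rw [fAltLoop, if_pos (by omega : (0:Int) < m), fdiv2_eq, hdiv, if_pos hmod, hb]
          simp
      · have h41 : n % 4 = 1 := by omega
        -- t = (n-1)/2 is even and positive: B appends move 1 and recurses on t/2;
        -- A's first child is even (fails), its second child m = (n+1)/2 gets move 1
        have heven : ((n - 1) / 2) % 2 = 0 := by omega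
        set m : Int := (n + 1) / 2 with hm
        have hmodd : m % 2 = 1 := by omega
        have hm1 : 1 ≤ m := by omega
        have hchild : (n - 1) / 2 / 2 = (m - 1) / 2 := by omega
        obtain ⟨l, ha, hb⟩ := ih m.toNat (by omega) m rfl hm1 hmodd f1 f2
          (by omega) (by omega) (acc ++ [1])
        refine ⟨l ++ [1], ?_, ?_⟩
        · simp [fAux, hone, h2, fAux_even f1 _ heven, ← hm, ha]
        · have hmod : ¬ PySem.Int.mod ((n - 1) / 2) 2 ≠ 0 := by rw [mod2_eq]; omega
          rw [fAltLoop, if_pos (by omega : (0:Int) < (n - 1) / 2), fdiv2_eq, hchild,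
            if_neg hmod, hb]
          simp

-- ===== VERDICT (by name: the statement is the Claim_ definition above) =====
theorem f_spec : Claim_equal_f := by
  unfold Claim_equal_f
  intro n _ hpre
  unfold Spec_f f f_alt
  by_cases he : n % 2 = 0
  · rw [fAux_even _ _ he]
    simp [he]
  · have h1 : 1 ≤ n := hpre.resolve_left he
    have h2 : n % 2 = 1 := by omega
    obtain ⟨l, ha, hb⟩ := main_aux n.toNat n rfl h1 h2 (n.toNat + 1) (n.toNat + 1)
      (by omega) (by omega) []
    rw [ha, if_neg (by rw [mod2_eq]; omega), fdiv2_eq, hb]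
    simp
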